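-- pv_equiv track=rewrite | github.com/RodericDay/advent | 2015/16.py | check
-- ===== SOURCE A (Python) =====
-- goal = {
-- "children": 3,
-- "cats": 7,
-- "samoyeds": 2,
-- "pomeranians": 3,
-- "akitas": 0,
-- "vizslas": 0,
-- "goldfish": 5,
-- "trees": 3,
-- "cars": 2,
-- "perfumes": 1,
-- }
--
-- def check(data):
--     for key in data:
--         if key in ['trees','cats']:
--             yield data[key] > goal[key]
--         elif key in ['pomeranians','goldfish']:
--             yield data[key] < goal[key]
--         else:
--             yield data[key] == goal[key]
-- ===== SOURCE B (Python) =====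
-- # Each criterion is precompiled into an inclusive integer interval (lo, hi),
-- # None meaning unbounded: 'greater than g' is (g+1, None), 'less than g' is
-- # (None, g-1), 'equal to g' is (g, g).  Checking a reading is then a single
-- # interval-membership test, with no comparison selection at all.
-- bounds = {
--     "children": (3, 3),
--     "cats": (8, None),
--     "samoyeds": (2, 2),
--     "pomeranians": (None, 2),
--     "akitas": (0, 0),
--     "vizslas": (0, 0),
--     "goldfish": (None, 4),
--     "trees": (4, None),
--     "cars": (2, 2),
--     "perfumes": (1, 1),
-- }
--
-- def _within(b, v):
--     lo, hi = b
--     return (lo is None or lo <= v) and (hi is None or v <= hi)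
--
-- def check(data):
--     return [_within(bounds[key], data[key]) for key in data]
-- ===== Notes on version B (the rewrite author's own statement) =====
-- stated objective: alternative
-- what changed: The goal dict plus a three-way if/elif choosing among >, < and == is replaced by a precompiled table of inclusive integer intervals (lo, hi) with None for unbounded ends, so every key is judged by one uniform interval-membership test instead of a selected comparison.
import Mathlib
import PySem

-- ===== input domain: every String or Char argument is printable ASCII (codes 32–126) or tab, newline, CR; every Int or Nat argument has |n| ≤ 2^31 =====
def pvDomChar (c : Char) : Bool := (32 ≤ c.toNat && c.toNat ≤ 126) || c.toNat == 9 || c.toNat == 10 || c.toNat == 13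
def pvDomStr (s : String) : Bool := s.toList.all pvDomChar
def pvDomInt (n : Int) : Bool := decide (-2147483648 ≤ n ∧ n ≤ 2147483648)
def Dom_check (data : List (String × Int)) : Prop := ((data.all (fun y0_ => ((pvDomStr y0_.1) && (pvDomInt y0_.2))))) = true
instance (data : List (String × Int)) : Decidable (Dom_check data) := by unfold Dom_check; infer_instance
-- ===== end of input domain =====

-- B replaces the if/elif comparison selection by a precompiled interval table (one uniform membership test); equivalence is on return values.

-- ===== PORT A =====
def pvGoal : PySem.Dict String Int :=
  PySem.Dict.ofList [("children", 3), ("cats", 7), ("samoyeds", 2), ("pomeranians", 3),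
    ("akitas", 0), ("vizslas", 0), ("goldfish", 5), ("trees", 3), ("cars", 2), ("perfumes", 1)]

-- 'for key in data: yield …'.  Pre_check requires distinct keys, so data[key] for the
-- iterated key is exactly the pair's own value, and requires key ∈ goal, so goal[key]
-- (ported as getD with an unreachable default) never raises KeyError.
def check (data : List (String × Int)) : List Bool :=
  data.map (fun p =>
    if p.1 = "trees" ∨ p.1 = "cats" then decide (p.2 > pvGoal.getD p.1 0)
    else if p.1 = "pomeranians" ∨ p.1 = "goldfish" then decide (p.2 < pvGoal.getD p.1 0)
    else decide (p.2 = pvGoal.getD p.1 0))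

-- ===== PORT B =====
def pvBounds : PySem.Dict String (Option Int × Option Int) :=
  PySem.Dict.ofList [("children", (some 3, some 3)), ("cats", (some 8, none)),
    ("samoyeds", (some 2, some 2)), ("pomeranians", (none, some 2)),
    ("akitas", (some 0, some 0)), ("vizslas", (some 0, some 0)),
    ("goldfish", (none, some 4)), ("trees", (some 4, none)),
    ("cars", (some 2, some 2)), ("perfumes", (some 1, some 1))]

-- '(lo is None or lo <= v) and (hi is None or v <= hi)'
def pvWithin (b : Option Int × Option Int) (v : Int) : Bool :=
  (match b.1 with | none => true | some lo => decide (lo ≤ v)) &&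
  (match b.2 with | none => true | some hi => decide (v ≤ hi))

-- 'bounds[key]' raises KeyError for keys outside the table; Pre_check excludes
-- those, so the getD default (none, none) is never reached on admitted inputs.
def check_alt (data : List (String × Int)) : List Bool :=
  data.map (fun p => pvWithin (pvBounds.getD p.1 (none, none)) p.2)

-- ===== PRECONDITION & SPEC =====
-- Pre_ excludes lists with duplicate keys (a Python dict collapses them, so the association
-- list does not correspond to the dict A iterates) and keys absent from goal (A raises KeyError).
def Pre_check (data : List (String × Int)) : Prop :=
  (data.map Prod.fst).Nodup ∧ ∀ p ∈ data, pvGoal.contains p.1 = true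
instance (data : List (String × Int)) : Decidable (Pre_check data) := by unfold Pre_check; infer_instance

def pvWitness_check : (List (String × Int)) := [("cats", 8), ("cars", 2), ("goldfish", 4)]

def Spec_check (data : List (String × Int)) (out : List Bool) : Prop := out = check_alt data
instance (data : List (String × Int)) (out : List Bool) : Decidable (Spec_check data out) := by unfold Spec_check; infer_instance

-- ===== CLAIM (what is proved, stated in full; the proofs are below) =====
def Claim_equal_check : Prop := ∀ (data : List (String × Int)), Dom_check data → Pre_check data → Spec_check data (check data)

-- ===== LEMMAS AND PROOFS =====

-- the goal table's key list, evaluated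
theorem pvGoal_keys : pvGoal.keys = ["children", "cats", "samoyeds", "pomeranians",
    "akitas", "vizslas", "goldfish", "trees", "cars", "perfumes"] := by decide

-- the goal table contains exactly these ten keys
theorem contains_iff (k : String) :
    pvGoal.contains k = true ↔
      k ∈ ["children", "cats", "samoyeds", "pomeranians", "akitas", "vizslas",
           "goldfish", "trees", "cars", "perfumes"] := by
  rw [PySem.Dict.contains_eq_decide_mem_keys, pvGoal_keys]
  simp

-- key "children": A's comparison equals B's interval test
theorem case_children (v : Int) :
    (if ("children":String) = "trees" ∨ ("children":String) = "cats" then decide (v > pvGoal.getD "children" 0)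
     else if ("children":String) = "pomeranians" ∨ ("children":String) = "goldfish" then decide (v < pvGoal.getD "children" 0)
     else decide (v = pvGoal.getD "children" 0)) = pvWithin (pvBounds.getD "children" (none, none)) v := by
  have g : pvGoal.getD "children" 0 = 3 := by decide
  have b : pvBounds.getD "children" ((none : Option Int), (none : Option Int)) = (some 3, some 3) := by decide
  rw [g, b]; simp [pvWithin, ← Bool.decide_and, decide_eq_decide]; omega

-- key "cats": A's comparison equals B's interval test
theorem case_cats (v : Int) :
    (if ("cats":String) = "trees" ∨ ("cats":String) = "cats" then decide (v > pvGoal.getD "cats" 0)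
     else if ("cats":String) = "pomeranians" ∨ ("cats":String) = "goldfish" then decide (v < pvGoal.getD "cats" 0)
     else decide (v = pvGoal.getD "cats" 0)) = pvWithin (pvBounds.getD "cats" (none, none)) v := by
  have g : pvGoal.getD "cats" 0 = 7 := by decide
  have b : pvBounds.getD "cats" ((none : Option Int), (none : Option Int)) = (some 8, none) := by decide
  rw [g, b]; simp [pvWithin, ← Bool.decide_and, decide_eq_decide]; omega

-- key "samoyeds": A's comparison equals B's interval test
theorem case_samoyeds (v : Int) :
    (if ("samoyeds":String) = "trees" ∨ ("samoyeds":String) = "cats" then decide (v > pvGoal.getD "samoyeds" 0)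
     else if ("samoyeds":String) = "pomeranians" ∨ ("samoyeds":String) = "goldfish" then decide (v < pvGoal.getD "samoyeds" 0)
     else decide (v = pvGoal.getD "samoyeds" 0)) = pvWithin (pvBounds.getD "samoyeds" (none, none)) v := by
  have g : pvGoal.getD "samoyeds" 0 = 2 := by decide
  have b : pvBounds.getD "samoyeds" ((none : Option Int), (none : Option Int)) = (some 2, some 2) := by decide
  rw [g, b]; simp [pvWithin, ← Bool.decide_and, decide_eq_decide]; omega

-- key "pomeranians": A's comparison equals B's interval test
theorem case_pomeranians (v : Int) :
    (if ("pomeranians":String) = "trees" ∨ ("pomeranians":String) = "cats" then decide (v > pvGoal.getD "pomeranians" 0)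
     else if ("pomeranians":String) = "pomeranians" ∨ ("pomeranians":String) = "goldfish" then decide (v < pvGoal.getD "pomeranians" 0)
     else decide (v = pvGoal.getD "pomeranians" 0)) = pvWithin (pvBounds.getD "pomeranians" (none, none)) v := by
  have g : pvGoal.getD "pomeranians" 0 = 3 := by decide
  have b : pvBounds.getD "pomeranians" ((none : Option Int), (none : Option Int)) = (none, some 2) := by decide
  rw [g, b]; simp [pvWithin, ← Bool.decide_and, decide_eq_decide]; omega

-- key "akitas": A's comparison equals B's interval test
theorem case_akitas (v : Int) :
    (if ("akitas":String) = "trees" ∨ ("akitas":String) = "cats" then decide (v > pvGoal.getD "akitas" 0)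
     else if ("akitas":String) = "pomeranians" ∨ ("akitas":String) = "goldfish" then decide (v < pvGoal.getD "akitas" 0)
     else decide (v = pvGoal.getD "akitas" 0)) = pvWithin (pvBounds.getD "akitas" (none, none)) v := by
  have g : pvGoal.getD "akitas" 0 = 0 := by decide
  have b : pvBounds.getD "akitas" ((none : Option Int), (none : Option Int)) = (some 0, some 0) := by decide
  rw [g, b]; simp [pvWithin, ← Bool.decide_and, decide_eq_decide]; omega

-- key "vizslas": A's comparison equals B's interval test
theorem case_vizslas (v : Int) :
    (if ("vizslas":String) = "trees" ∨ ("vizslas":String) = "cats" then decide (v > pvGoal.getD "vizslas" 0)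
     else if ("vizslas":String) = "pomeranians" ∨ ("vizslas":String) = "goldfish" then decide (v < pvGoal.getD "vizslas" 0)
     else decide (v = pvGoal.getD "vizslas" 0)) = pvWithin (pvBounds.getD "vizslas" (none, none)) v := by
  have g : pvGoal.getD "vizslas" 0 = 0 := by decide
  have b : pvBounds.getD "vizslas" ((none : Option Int), (none : Option Int)) = (some 0, some 0) := by decide
  rw [g, b]; simp [pvWithin, ← Bool.decide_and, decide_eq_decide]; omega

-- key "goldfish": A's comparison equals B's interval test
theorem case_goldfish (v : Int) :
    (if ("goldfish":String) = "trees" ∨ ("goldfish":String) = "cats" then decide (v > pvGoal.getD "goldfish" 0)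
     else if ("goldfish":String) = "pomeranians" ∨ ("goldfish":String) = "goldfish" then decide (v < pvGoal.getD "goldfish" 0)
     else decide (v = pvGoal.getD "goldfish" 0)) = pvWithin (pvBounds.getD "goldfish" (none, none)) v := by
  have g : pvGoal.getD "goldfish" 0 = 5 := by decide
  have b : pvBounds.getD "goldfish" ((none : Option Int), (none : Option Int)) = (none, some 4) := by decide
  rw [g, b]; simp [pvWithin, ← Bool.decide_and, decide_eq_decide]; omega

-- key "trees": A's comparison equals B's interval test
theorem case_trees (v : Int) :
    (if ("trees":String) = "trees" ∨ ("trees":String) = "cats" then decide (v > pvGoal.getD "trees" 0)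
     else if ("trees":String) = "pomeranians" ∨ ("trees":String) = "goldfish" then decide (v < pvGoal.getD "trees" 0)
     else decide (v = pvGoal.getD "trees" 0)) = pvWithin (pvBounds.getD "trees" (none, none)) v := by
  have g : pvGoal.getD "trees" 0 = 3 := by decide
  have b : pvBounds.getD "trees" ((none : Option Int), (none : Option Int)) = (some 4, none) := by decide
  rw [g, b]; simp [pvWithin, ← Bool.decide_and, decide_eq_decide]; omega

-- key "cars": A's comparison equals B's interval test
theorem case_cars (v : Int) :
    (if ("cars":String) = "trees" ∨ ("cars":String) = "cats" then decide (v > pvGoal.getD "cars" 0)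
     else if ("cars":String) = "pomeranians" ∨ ("cars":String) = "goldfish" then decide (v < pvGoal.getD "cars" 0)
     else decide (v = pvGoal.getD "cars" 0)) = pvWithin (pvBounds.getD "cars" (none, none)) v := by
  have g : pvGoal.getD "cars" 0 = 2 := by decide
  have b : pvBounds.getD "cars" ((none : Option Int), (none : Option Int)) = (some 2, some 2) := by decide
  rw [g, b]; simp [pvWithin, ← Bool.decide_and, decide_eq_decide]; omega

-- key "perfumes": A's comparison equals B's interval test
theorem case_perfumes (v : Int) :
    (if ("perfumes":String) = "trees" ∨ ("perfumes":String) = "cats" then decide (v > pvGoal.getD "perfumes" 0)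
     else if ("perfumes":String) = "pomeranians" ∨ ("perfumes":String) = "goldfish" then decide (v < pvGoal.getD "perfumes" 0)
     else decide (v = pvGoal.getD "perfumes" 0)) = pvWithin (pvBounds.getD "perfumes" (none, none)) v := by
  have g : pvGoal.getD "perfumes" 0 = 1 := by decide
  have b : pvBounds.getD "perfumes" ((none : Option Int), (none : Option Int)) = (some 1, some 1) := by decide
  rw [g, b]; simp [pvWithin, ← Bool.decide_and, decide_eq_decide]; omega
-- per-key agreement: A's selected comparison equals B's interval membership
theorem check_elem_eq (p : String × Int) (hmem : pvGoal.contains p.1 = true) :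
    (if p.1 = "trees" ∨ p.1 = "cats" then decide (p.2 > pvGoal.getD p.1 0)
     else if p.1 = "pomeranians" ∨ p.1 = "goldfish" then decide (p.2 < pvGoal.getD p.1 0)
     else decide (p.2 = pvGoal.getD p.1 0))
    = pvWithin (pvBounds.getD p.1 (none, none)) p.2 := by
  obtain ⟨k, v⟩ := p
  rw [contains_iff] at hmem
  simp only [List.mem_cons, List.not_mem_nil, or_false] at hmem
  rcases hmem with h | h | h | h | h | h | h | h | h | h <;> subst h
  · exact case_children v
  · exact case_cats v
  · exact case_samoyeds v
  · exact case_pomeranians v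
  · exact case_akitas v
  · exact case_vizslas v
  · exact case_goldfish v
  · exact case_trees v
  · exact case_cars v
  · exact case_perfumes v

-- ===== VERDICT (by name: the statement is the Claim_ definition above) =====
theorem check_spec : Claim_equal_check := by
  intro data _ hpre
  unfold Spec_check check check_alt
  exact List.map_congr_left (fun p hp => check_elem_eq p (hpre.2 p hp))
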